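-- pv_equiv track=rewrite | github.com/uricchio/2DSFS-scan | likelihoodScan/twoDSFS_class.py | fold_1d_sfs
-- ===== SOURCE A (Python) =====
-- def fold_1d_sfs(sfs_dict):
--
--     # get total number of chromosomes (2N)
--     num_chromosomes = max(sfs_dict.keys())
--
--     folded_sfs_dict = {}
--
--     for freq, count in sfs_dict.items():
--         # calculate maf
--         minor_freq = min(freq, num_chromosomes - freq)
--
--         # add the count to the corresponding bin in the folded sfs
--         if minor_freq in folded_sfs_dict:
--             folded_sfs_dict[minor_freq] += count
--         else:
--             folded_sfs_dict[minor_freq] = count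
--
--     return folded_sfs_dict
-- ===== SOURCE B (Python) =====
-- def fold_1d_sfs(sfs_dict):
--     # gather each minor-allele bin from the two symmetric ends of the spectrum
--     num_chromosomes = max(sfs_dict.keys())
--
--     # distinct minor-frequency bins, in order of first appearance
--     bins = []
--     seen = set()
--     for freq in sfs_dict:
--         m = min(freq, num_chromosomes - freq)
--         if m not in seen:
--             seen.add(m)
--             bins.append(m)
--
--     return {m: (sfs_dict.get(m, 0) if m == num_chromosomes - m
--                 else sfs_dict.get(m, 0) + sfs_dict.get(num_chromosomes - m, 0))
--             for m in bins}
-- ===== Notes on version B (the rewrite author's own statement) =====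
-- stated objective: alternative
-- what changed: Instead of scattering every item into an accumulator dict (membership test + add-or-create per item), B first computes the ordered set of distinct minor-frequency bins and then GATHERS each bin's count with direct lookups at the two symmetric indices m and 2N-m (one lookup at the midpoint bin).
import Mathlib
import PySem

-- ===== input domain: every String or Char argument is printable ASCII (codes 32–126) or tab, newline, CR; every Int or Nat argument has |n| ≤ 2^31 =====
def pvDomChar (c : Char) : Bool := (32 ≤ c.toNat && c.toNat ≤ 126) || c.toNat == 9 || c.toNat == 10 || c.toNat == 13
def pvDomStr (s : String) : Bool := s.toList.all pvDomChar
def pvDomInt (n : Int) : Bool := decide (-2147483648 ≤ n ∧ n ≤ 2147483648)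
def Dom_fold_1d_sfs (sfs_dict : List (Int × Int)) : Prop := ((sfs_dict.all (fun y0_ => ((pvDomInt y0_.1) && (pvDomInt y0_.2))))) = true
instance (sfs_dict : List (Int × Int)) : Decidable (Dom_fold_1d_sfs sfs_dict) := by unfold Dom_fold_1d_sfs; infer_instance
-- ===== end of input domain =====

-- B gathers each minor-allele bin by symmetric two-ended lookup instead of A's scatter into an
-- accumulator dict; same O(n) cost, different decomposition (return value only; no mutation).


-- ===== PORT A =====
def fold_1d_sfs (sfs_dict : List (Int × Int)) : List (Int × Int) :=
  -- num_chromosomes = max(sfs_dict.keys())  (empty dict raises ValueError → excluded by Pre_)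
  let num_chromosomes : Int := ((PySem.List.max? (sfs_dict.map Prod.fst) (fun x => x)).getD 0)
  let folded : PySem.Dict Int Int :=
    sfs_dict.foldl (fun d fc =>
      let minor_freq := min fc.1 (num_chromosomes - fc.1)
      if d.contains minor_freq then
        d.insert minor_freq (d.getD minor_freq 0 + fc.2)   -- folded[m] += count
      else
        d.insert minor_freq fc.2)                          -- folded[m] = count
      PySem.Dict.empty
  folded.items

-- ===== PORT B =====
def fold_1d_sfs_alt (sfs_dict : List (Int × Int)) : List (Int × Int) :=
  let num_chromosomes : Int := ((PySem.List.max? (sfs_dict.map Prod.fst) (fun x => x)).getD 0)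
  -- the seen-set/append loop over the keys = first occurrences of the minor freqs, in order
  let bins : List Int :=
    PySem.Set.ofList (sfs_dict.map (fun p => min p.1 (num_chromosomes - p.1)))
  bins.map (fun m =>
    (m, if m = num_chromosomes - m then
          PySem.Dict.getD ⟨sfs_dict⟩ m 0
        else
          PySem.Dict.getD ⟨sfs_dict⟩ m 0 + PySem.Dict.getD ⟨sfs_dict⟩ (num_chromosomes - m) 0))

-- ===== PRECONDITION & SPEC =====
-- Pre_ excludes the empty dict, on which A's max() raises ValueError, and lists with duplicate
-- keys, which do not represent a Python dict (dict keys are unique).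
def Pre_fold_1d_sfs (sfs_dict : List (Int × Int)) : Prop :=
  sfs_dict ≠ [] ∧ (sfs_dict.map Prod.fst).Nodup
instance (sfs_dict : List (Int × Int)) : Decidable (Pre_fold_1d_sfs sfs_dict) := by
  unfold Pre_fold_1d_sfs; infer_instance
def pvWitness_fold_1d_sfs : (List (Int × Int)) := [(0, 5), (1, 3), (4, 2), (3, 1)]

def Spec_fold_1d_sfs (sfs_dict : List (Int × Int)) (out : List (Int × Int)) : Prop := out = fold_1d_sfs_alt sfs_dict
instance (sfs_dict : List (Int × Int)) (out : List (Int × Int)) : Decidable (Spec_fold_1d_sfs sfs_dict out) := by unfold Spec_fold_1d_sfs; infer_instance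

-- ===== CLAIM (what is proved, stated in full; the proofs are below) =====
def Claim_equal_fold_1d_sfs : Prop := ∀ (sfs_dict : List (Int × Int)), Dom_fold_1d_sfs sfs_dict → Pre_fold_1d_sfs sfs_dict → Spec_fold_1d_sfs sfs_dict (fold_1d_sfs sfs_dict)

-- ===== LEMMAS AND PROOFS =====

-- the minor frequency of f given 2N = n
def pvMnr (n f : Int) : Int := min f (n - f)

-- total count A assigns to bin m
def pvSumBin (n : Int) (l : List (Int × Int)) (m : Int) : Int :=
  ((l.filter (fun x => pvMnr n x.1 == m)).map Prod.snd).sum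

theorem pvMnr_le (n f : Int) : pvMnr n f ≤ n - pvMnr n f := by
  unfold pvMnr; rw [min_def]; split <;> omega

theorem pvMnr_self {n m : Int} (h : m ≤ n - m) : pvMnr n m = m := by
  unfold pvMnr; rw [min_def]; split <;> omega

theorem pvMnr_mirror {n m : Int} (h : m ≤ n - m) : pvMnr n (n - m) = m := by
  unfold pvMnr; rw [min_def]; split <;> omega

theorem pvMnr_eq_cases {n f m : Int} (h : pvMnr n f = m) : f = m ∨ f = n - m := by
  unfold pvMnr at h; rw [min_def] at h; split at h <;> omega

-- A's loop rewritten with the branches merged (getD default 0 makes both branches one insert)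
theorem pvStep_eq (n : Int) :
    (fun (d : PySem.Dict Int Int) (fc : Int × Int) =>
      let minor_freq := min fc.1 (n - fc.1)
      if d.contains minor_freq then
        d.insert minor_freq (d.getD minor_freq 0 + fc.2)
      else
        d.insert minor_freq fc.2)
    = (fun d fc => d.insert (pvMnr n fc.1) (d.getD (pvMnr n fc.1) 0 + fc.2)) := by
  funext d fc
  show (if d.contains (min fc.1 (n - fc.1)) then _ else _) = _
  simp only [pvMnr]
  by_cases h : d.contains (min fc.1 (n - fc.1))
  · simp [h]
  · simp only [Bool.not_eq_true] at h
    rw [if_neg (by simp [h]), PySem.Dict.getD_of_not_contains _ _ h, zero_add]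

theorem pvSumBin_append (n : Int) (l : List (Int × Int)) (x : Int × Int) (m : Int) :
    pvSumBin n (l ++ [x]) m = pvSumBin n l m + (if pvMnr n x.1 = m then x.2 else 0) := by
  unfold pvSumBin
  rw [List.filter_append]
  by_cases h : pvMnr n x.1 = m <;> simp [h]

theorem pvSumBin_cons (n : Int) (k c : Int) (t : List (Int × Int)) (m : Int) :
    pvSumBin n ((k, c) :: t) m = (if pvMnr n k = m then c else 0) + pvSumBin n t m := by
  unfold pvSumBin
  by_cases h : pvMnr n k = m <;> simp [h]

theorem pvSumBin_zero (n : Int) (l : List (Int × Int)) (m : Int)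
    (h1 : m ∉ l.map Prod.fst) (h2 : n - m ∉ l.map Prod.fst) : pvSumBin n l m = 0 := by
  unfold pvSumBin
  have : l.filter (fun x => pvMnr n x.1 == m) = [] := by
    rw [List.filter_eq_nil_iff]
    intro x hx hbe
    have := pvMnr_eq_cases (n := n) (f := x.1) (m := m) (by simpa using hbe)
    rcases this with h | h
    · exact h1 (List.mem_map.2 ⟨x, hx, h⟩)
    · exact h2 (List.mem_map.2 ⟨x, hx, by omega⟩)
  simp [this]

theorem pvOfList_append_singleton {a : List Int} {b : Int} :
    PySem.Set.ofList (a ++ [b]) = PySem.Set.add (PySem.Set.ofList a) b := by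
  rw [PySem.Set.ofList_eq_foldl, PySem.Set.ofList_eq_foldl, List.foldl_append,
      List.foldl_cons, List.foldl_nil]

theorem pvSet_add_mem {s : PySem.Set Int} {b : Int} (h : b ∈ s) : PySem.Set.add s b = s := by
  unfold PySem.Set.add PySem.Set.contains
  simp [h]

theorem pvSet_add_not_mem {s : PySem.Set Int} {b : Int} (h : b ∉ s) :
    PySem.Set.add s b = s ++ [b] := by
  unfold PySem.Set.add PySem.Set.contains
  simp [h]

-- characterisation of A's accumulator loop: items = bins (first-occurrence order) with bin sums
theorem pvItemsA (n : Int) (l : List (Int × Int)) :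
    (l.foldl (fun d fc => d.insert (pvMnr n fc.1) (d.getD (pvMnr n fc.1) 0 + fc.2))
        PySem.Dict.empty).items
    = (PySem.Set.ofList (l.map (fun x => pvMnr n x.1))).map (fun m => (m, pvSumBin n l m)) := by
  induction l using List.reverseRecOn with
  | nil => rfl
  | append_singleton l x ih =>
    rw [List.foldl_append, List.foldl_cons, List.foldl_nil, List.map_append, List.map_cons,
        List.map_nil, pvOfList_append_singleton]
    set D := l.foldl
        (fun (d : PySem.Dict Int Int) (fc : Int × Int) =>
          d.insert (pvMnr n fc.1) (d.getD (pvMnr n fc.1) 0 + fc.2)) PySem.Dict.empty with hD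
    have hkeys : D.keys = PySem.Set.ofList (l.map (fun x => pvMnr n x.1)) := by
      rw [hD, PySem.Dict.keys_foldl_insert_key]
      simp [PySem.Dict.empty, PySem.Set.update_nil_left]
    have hnodup : D.keys.Nodup := by rw [hkeys]; exact PySem.Set.nodup_ofList _
    by_cases hmem : pvMnr n x.1 ∈ PySem.Set.ofList (l.map (fun y => pvMnr n y.1))
    · have hcont : D.contains (pvMnr n x.1) = true := by
        rw [PySem.Dict.contains_eq_decide_mem_keys, hkeys]; simpa using hmem
      rw [PySem.Dict.items_insert_of_contains _ _ hcont, pvSet_add_mem hmem, ih, List.map_map]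
      apply List.map_congr_left
      intro a ha
      by_cases ham : a = pvMnr n x.1
      · have hget : D.getD (pvMnr n x.1) 0 = pvSumBin n l (pvMnr n x.1) := by
          apply PySem.Dict.getD_of_mem_items _ _ hnodup
          rw [ih]; exact List.mem_map.2 ⟨pvMnr n x.1, hmem, rfl⟩
        rw [ham]
        simp only [Function.comp_apply]
        rw [if_pos (by simp), hget, pvSumBin_append, if_pos rfl]
      · have hne : ((a, pvSumBin n l a).1 == pvMnr n x.1) = false := by
          simpa using ham
        simp only [Function.comp_apply, hne, Bool.false_eq_true, if_false]
        rw [pvSumBin_append, if_neg (fun h => ham h.symm), add_zero]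
    · have hcont : D.contains (pvMnr n x.1) = false := by
        rw [PySem.Dict.contains_eq_decide_mem_keys, hkeys]; simpa using hmem
      rw [PySem.Dict.items_insert_of_not_contains _ _ hcont,
          PySem.Dict.getD_of_not_contains _ _ hcont, pvSet_add_not_mem hmem, List.map_append, ih]
      congr 1
      · apply List.map_congr_left
        intro a ha
        have hne : pvMnr n x.1 ≠ a := fun h => hmem (h ▸ ha)
        rw [pvSumBin_append, if_neg hne, add_zero]
      · have hz : pvSumBin n l (pvMnr n x.1) = 0 := by
          unfold pvSumBin
          have hfil : l.filter (fun y => pvMnr n y.1 == pvMnr n x.1) = [] := by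
            rw [List.filter_eq_nil_iff]
            intro y hy hbe
            exact hmem (by
              rw [PySem.Set.mem_ofList]
              exact List.mem_map.2 ⟨y, hy, by simpa using hbe⟩)
          simp [hfil]
        rw [List.map_cons, List.map_nil, pvSumBin_append, hz, if_pos rfl, zero_add]

theorem pvGetD_cons (k c q v : Int) (t : List (Int × Int)) :
    PySem.Dict.getD (⟨(k, c) :: t⟩ : PySem.Dict Int Int) q v
    = if k = q then c else PySem.Dict.getD ⟨t⟩ q v := by
  rw [PySem.Dict.getD_eq_get?_getD, PySem.Dict.get?_mk_cons]
  by_cases h : k = q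
  · simp [h]
  · simp [h, PySem.Dict.getD_eq_get?_getD]

-- with unique keys, the midpoint bin is a single lookup …
theorem pvGather_mid (n : Int) (l : List (Int × Int)) (m : Int)
    (hnd : (l.map Prod.fst).Nodup) (hmid : m = n - m) :
    pvSumBin n l m = PySem.Dict.getD ⟨l⟩ m 0 := by
  induction l with
  | nil => simp [pvSumBin, PySem.Dict.getD_eq_get?_getD, PySem.Dict.get?]
  | cons p t ih =>
    obtain ⟨k, c⟩ := p
    simp only [List.map_cons, List.nodup_cons] at hnd
    obtain ⟨hk, hndt⟩ := hnd
    rw [pvSumBin_cons, pvGetD_cons]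
    by_cases hkm : k = m
    · have hle : m ≤ n - m := by omega
      have hpm : pvMnr n k = m := by rw [hkm]; exact pvMnr_self hle
      have hz : pvSumBin n t m = 0 :=
        pvSumBin_zero n t m (hkm ▸ hk) (by rw [← hmid]; exact hkm ▸ hk)
      rw [if_pos hpm, hz, if_pos hkm, add_zero]
    · have hpm : pvMnr n k ≠ m := fun h => by
        rcases pvMnr_eq_cases h with h' | h' <;> omega
      rw [if_neg hpm, if_neg hkm, zero_add, ih hndt]

-- … and every other bin gathers from the two symmetric ends
theorem pvGather_side (n : Int) (l : List (Int × Int)) (m : Int)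
    (hnd : (l.map Prod.fst).Nodup) (hle : m ≤ n - m) (hmid : m ≠ n - m) :
    pvSumBin n l m = PySem.Dict.getD ⟨l⟩ m 0 + PySem.Dict.getD ⟨l⟩ (n - m) 0 := by
  induction l with
  | nil => simp [pvSumBin, PySem.Dict.getD_eq_get?_getD, PySem.Dict.get?]
  | cons p t ih =>
    obtain ⟨k, c⟩ := p
    simp only [List.map_cons, List.nodup_cons] at hnd
    obtain ⟨hk, hndt⟩ := hnd
    rw [pvSumBin_cons, ih hndt, pvGetD_cons, pvGetD_cons]
    by_cases hkm : k = m
    · have hpm : pvMnr n k = m := by rw [hkm]; exact pvMnr_self hle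
      have hz : PySem.Dict.getD (⟨t⟩ : PySem.Dict Int Int) m 0 = 0 := by
        apply PySem.Dict.getD_of_not_contains
        rw [PySem.Dict.contains_eq_decide_mem_keys, PySem.Dict.keys_mk]
        simp only [decide_eq_false_iff_not]; exact hkm ▸ hk
      rw [if_pos hpm, if_pos hkm, if_neg (by omega), hz]
      ring
    · by_cases hknm : k = n - m
      · have hpm : pvMnr n k = m := by rw [hknm]; exact pvMnr_mirror hle
        have hz : PySem.Dict.getD (⟨t⟩ : PySem.Dict Int Int) (n - m) 0 = 0 := by
          apply PySem.Dict.getD_of_not_contains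
          rw [PySem.Dict.contains_eq_decide_mem_keys, PySem.Dict.keys_mk]
          simp only [decide_eq_false_iff_not]; exact hknm ▸ hk
        rw [if_pos hpm, if_neg hkm, if_pos hknm, hz]
        ring
      · have hpm : pvMnr n k ≠ m := fun h => by
          rcases pvMnr_eq_cases h with h' | h' <;> omega
        rw [if_neg hpm, if_neg hkm, if_neg hknm, zero_add]

-- ===== VERDICT (by name: the statement is the Claim_ definition above) =====
theorem fold_1d_sfs_spec : Claim_equal_fold_1d_sfs := by
  intro l _ hpre
  obtain ⟨-, hnd⟩ := hpre
  show fold_1d_sfs l = fold_1d_sfs_alt l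
  unfold fold_1d_sfs fold_1d_sfs_alt
  set n : Int := ((PySem.List.max? (l.map Prod.fst) (fun x => x)).getD 0) with hn
  show (l.foldl _ PySem.Dict.empty).items = _
  rw [pvStep_eq n]
  have hmap : (l.map (fun p => min p.1 (n - p.1))) = l.map (fun p => pvMnr n p.1) := rfl
  rw [pvItemsA n l]
  simp only [hmap]
  apply List.map_congr_left
  intro m hm
  have hle : m ≤ n - m := by
    rw [PySem.Set.mem_ofList] at hm
    obtain ⟨x, -, hx⟩ := List.mem_map.1 hm
    rw [← hx]
    exact pvMnr_le n x.1
  by_cases hmid : m = n - m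
  · rw [if_pos hmid, pvGather_mid n l m hnd hmid]
  · rw [if_neg hmid, pvGather_side n l m hnd hle hmid]
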